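-- pv_equiv track=rewrite | github.com/Stage-11-Agentics/lattice | scripts/lattice_art.py | make_grid_lattice
-- ===== SOURCE A (Python) =====
-- def make_grid_lattice(cols: int = 32, rows: int = 24) -> list[list[int]]:
--     """Regular grid lattice with nodes at intersections."""
--     grid = [[0] * cols for _ in range(rows)]
--     h_spacing = 8
--     v_spacing = 6
--
--     for y in range(rows):
--         for x in range(cols):
--             # Horizontal lines
--             if y % v_spacing == 0:
--                 grid[y][x] = 1
--             # Vertical lines
--             if x % h_spacing == 0:
--                 grid[y][x] = 1
--     return grid
-- ===== SOURCE B (Python) =====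
-- def make_grid_lattice(cols: int = 32, rows: int = 24) -> list[list[int]]:
--     """Regular grid lattice with nodes at intersections."""
--     if rows <= 0:
--         return []
--     line_row = [1] * cols
--     mark_row = [1 if x % 8 == 0 else 0 for x in range(cols)]
--     return [list(line_row) if y % 6 == 0 else list(mark_row) for y in range(rows)]
-- ===== Notes on version B (the rewrite author's own statement) =====
-- stated objective: simpler
-- what changed: Instead of allocating a zero grid and mutating every cell via two nested loops with two per-cell branches, B precomputes two prototype rows (full line row and intersection-mark row) once and builds the grid by copying the right prototype per row (empty for non-positive rows).
import Mathlib
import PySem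

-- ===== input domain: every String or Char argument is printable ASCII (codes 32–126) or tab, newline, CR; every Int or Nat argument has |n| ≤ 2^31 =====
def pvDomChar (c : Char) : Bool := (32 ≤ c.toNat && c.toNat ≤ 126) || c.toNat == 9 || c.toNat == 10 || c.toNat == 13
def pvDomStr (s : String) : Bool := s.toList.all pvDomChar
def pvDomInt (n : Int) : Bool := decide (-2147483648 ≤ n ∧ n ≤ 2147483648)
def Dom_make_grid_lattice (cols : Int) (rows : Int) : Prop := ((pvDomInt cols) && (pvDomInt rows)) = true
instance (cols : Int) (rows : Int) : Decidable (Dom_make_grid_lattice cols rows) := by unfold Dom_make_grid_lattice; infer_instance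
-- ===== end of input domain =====

-- B replaces A's cell-by-cell double-loop mutation of a zero grid by two precomputed prototype rows copied once per row.

-- ===== PORT A =====
-- grid[y][x] = v  (indices come from range(), hence in bounds; the no-op out-of-range behaviour of set/getD only makes this total)
def pvSetCell (g : List (List Int)) (y x : Int) (v : Int) : List (List Int) :=
  g.set y.toNat ((g.getD y.toNat []).set x.toNat v)

-- the inner 'for x in range(cols)' loop of A, for a fixed y
def pvInner (cols : Int) (y : Int) (g : List (List Int)) : List (List Int) :=
  (PySem.List.pyRange 0 cols 1).foldl (fun g x =>
    let g1 := if PySem.Int.mod y 6 = 0 then pvSetCell g y x 1 else g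
    if PySem.Int.mod x 8 = 0 then pvSetCell g1 y x 1 else g1) g

def make_grid_lattice (cols : Int) (rows : Int) : List (List Int) :=
  let grid := (PySem.List.pyRange 0 rows 1).map (fun _ => PySem.List.pyRepeat [0] cols)
  (PySem.List.pyRange 0 rows 1).foldl (fun g y => pvInner cols y g) grid

-- ===== PORT B =====
def make_grid_lattice_alt (cols : Int) (rows : Int) : List (List Int) :=
  if rows ≤ 0 then [] else
  let line_row := PySem.List.pyRepeat [1] cols
  let mark_row := (PySem.List.pyRange 0 cols 1).map (fun x => if PySem.Int.mod x 8 = 0 then (1 : Int) else 0)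
  (PySem.List.pyRange 0 rows 1).map (fun y => if PySem.Int.mod y 6 = 0 then line_row else mark_row)

-- ===== PRECONDITION & SPEC =====
def Spec_make_grid_lattice (cols : Int) (rows : Int) (out : List (List Int)) : Prop := out = make_grid_lattice_alt cols rows
instance (cols : Int) (rows : Int) (out : List (List Int)) : Decidable (Spec_make_grid_lattice cols rows out) := by unfold Spec_make_grid_lattice; infer_instance

-- ===== CLAIM (what is proved, stated in full; the proofs are below) =====
def Claim_equal_make_grid_lattice : Prop := ∀ (cols : Int) (rows : Int), Dom_make_grid_lattice cols rows → Spec_make_grid_lattice cols rows (make_grid_lattice cols rows)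

-- ===== LEMMAS AND PROOFS =====

-- final value of cell (y, x)
def pvCell (y x : Int) : Int := if PySem.Int.mod y 6 = 0 ∨ PySem.Int.mod x 8 = 0 then 1 else 0

-- A's inner step, in row terms
def pvRowStep (y : Int) (r : List Int) (x : Int) : List Int :=
  if PySem.Int.mod y 6 = 0 ∨ PySem.Int.mod x 8 = 0 then r.set x.toNat 1 else r

lemma pv_range_toNat (b : Int) : PySem.List.pyRange 0 b 1 = PySem.List.pyRange 0 (b.toNat : Int) 1 := by
  have h : (b - 0).toNat = (((b.toNat : Int)) - 0).toNat := by omega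
  rw [PySem.List.pyRange_one, PySem.List.pyRange_one, h]

lemma pvStep_eq (y x : Int) (g : List (List Int)) (hlen : y.toNat < g.length) :
    (let g1 := if PySem.Int.mod y 6 = 0 then pvSetCell g y x 1 else g
     if PySem.Int.mod x 8 = 0 then pvSetCell g1 y x 1 else g1) =
    (if PySem.Int.mod y 6 = 0 ∨ PySem.Int.mod x 8 = 0 then pvSetCell g y x 1 else g) := by
  by_cases hy : PySem.Int.mod y 6 = 0 <;> by_cases hx : PySem.Int.mod x 8 = 0 <;>
    simp only [hy, hx, if_true, if_false, or_true, or_false]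
  unfold pvSetCell
  simp [List.getD, hlen, List.set_set]

lemma pvInner_fold (y : Int) (xs : List Int) (g : List (List Int)) (hlen : y.toNat < g.length) :
    xs.foldl (fun g x =>
      let g1 := if PySem.Int.mod y 6 = 0 then pvSetCell g y x 1 else g
      if PySem.Int.mod x 8 = 0 then pvSetCell g1 y x 1 else g1) g =
    g.set y.toNat (xs.foldl (pvRowStep y) (g.getD y.toNat [])) := by
  induction xs generalizing g with
  | nil =>
    simp only [List.foldl_nil]
    rw [List.getD, List.getElem?_eq_getElem hlen]
    simp
  | cons x xs ih =>
    simp only [List.foldl_cons]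
    rw [pvStep_eq y x g hlen]
    by_cases hc : PySem.Int.mod y 6 = 0 ∨ PySem.Int.mod x 8 = 0
    · rw [if_pos hc]
      rw [ih (pvSetCell g y x 1) (by simpa [pvSetCell] using hlen)]
      have hget' : (pvSetCell g y x 1).getD y.toNat [] = pvRowStep y (g.getD y.toNat []) x := by
        unfold pvSetCell pvRowStep
        rw [if_pos hc]
        simp [List.getD, hlen]
      rw [hget']
      unfold pvSetCell
      rw [List.set_set]
    · rw [if_neg hc, ih g hlen]
      have hrs : pvRowStep y (g.getD y.toNat []) x = g.getD y.toNat [] := by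
        unfold pvRowStep
        rw [if_neg hc]
      rw [hrs]

lemma pvRow_fold (y : Int) (n : Nat) : ∀ (m k : Nat) (pre : List Int), pre.length = k → m = n - k → k ≤ n →
    (PySem.List.pyRange (k : Int) (n : Int) 1).foldl (pvRowStep y) (pre ++ List.replicate m 0) =
    pre ++ (PySem.List.pyRange (k : Int) (n : Int) 1).map (pvCell y) := by
  intro m
  induction m with
  | zero =>
    intro k pre hpre hm hk
    have hkn : k = n := by omega
    subst hkn
    rw [PySem.List.pyRange_one_eq_nil (le_refl _)]
    simp
  | succ m ih =>
    intro k pre hpre hm hk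
    have hklt : (k : Int) < n := by omega
    rw [PySem.List.pyRange_one_cons hklt]
    simp only [List.foldl_cons, List.map_cons]
    have hstep : pvRowStep y (pre ++ List.replicate (m + 1) 0) (k : Int) =
        (pre ++ [pvCell y k]) ++ List.replicate m 0 := by
      unfold pvRowStep pvCell
      by_cases hc : PySem.Int.mod y 6 = 0 ∨ PySem.Int.mod ((k : Nat) : Int) 8 = 0
      · simp only [hc, if_true]
        rw [List.set_append]
        simp [hpre, List.replicate_succ]
      · simp only [hc, if_false]
        simp [List.replicate_succ, List.append_assoc]
    rw [hstep]
    have : ((k : Int) + 1) = ((k + 1 : Nat) : Int) := by push_cast; ring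
    rw [this, ih (k + 1) (pre ++ [pvCell y k]) (by simp [hpre]) (by omega) (by omega)]
    simp

-- the row the inner loop produces equals B's prototype row for this y
lemma pvInner_row_eq (cols y : Int) :
    (PySem.List.pyRange 0 cols 1).foldl (pvRowStep y) (List.replicate cols.toNat 0) =
    (PySem.List.pyRange 0 cols 1).map (pvCell y) := by
  rw [pv_range_toNat cols]
  have := pvRow_fold y cols.toNat cols.toNat 0 [] rfl (by omega) (by omega)
  simpa using this

lemma pvOuter_fold (cols : Int) (rn : Nat) : ∀ (m k : Nat) (pre : List (List Int)), pre.length = k → m = rn - k → k ≤ rn →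
    (PySem.List.pyRange (k : Int) (rn : Int) 1).foldl (fun g y => pvInner cols y g)
      (pre ++ List.replicate m (List.replicate cols.toNat 0)) =
    pre ++ (PySem.List.pyRange (k : Int) (rn : Int) 1).map (fun y => (PySem.List.pyRange 0 cols 1).map (pvCell y)) := by
  intro m
  induction m with
  | zero =>
    intro k pre hpre hm hk
    have hkn : k = rn := by omega
    subst hkn
    rw [PySem.List.pyRange_one_eq_nil (le_refl _)]
    simp
  | succ m ih =>
    intro k pre hpre hm hk
    have hklt : (k : Int) < rn := by omega
    rw [PySem.List.pyRange_one_cons hklt]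
    simp only [List.foldl_cons, List.map_cons]
    have hlen : ((k : Int)).toNat < (pre ++ List.replicate (m + 1) (List.replicate cols.toNat 0)).length := by
      rw [List.length_append, List.length_replicate, hpre, Int.toNat_natCast]; omega
    have hget : (pre ++ List.replicate (m + 1) (List.replicate cols.toNat 0)).getD ((k : Int)).toNat [] =
        List.replicate cols.toNat 0 := by
      rw [List.getD, List.getElem?_append_right (by simp [hpre])]
      simp [hpre]
    have hstep : pvInner cols (k : Int) (pre ++ List.replicate (m + 1) (List.replicate cols.toNat 0)) =
        (pre ++ [(PySem.List.pyRange 0 cols 1).map (pvCell (k : Int))]) ++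
          List.replicate m (List.replicate cols.toNat 0) := by
      unfold pvInner
      rw [pvInner_fold (k : Int) _ _ hlen, hget, pvInner_row_eq]
      rw [List.set_append]
      simp [hpre, List.replicate_succ]
    rw [hstep]
    have : ((k : Int) + 1) = ((k + 1 : Nat) : Int) := by push_cast; ring
    rw [this, ih (k + 1) _ (by simp [hpre]) (by omega) (by omega)]
    simp

-- per-row agreement with B's prototypes
lemma pvRow_eq_proto (cols y : Int) :
    (PySem.List.pyRange 0 cols 1).map (pvCell y) =
    (if PySem.Int.mod y 6 = 0 then PySem.List.pyRepeat [1] cols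
     else (PySem.List.pyRange 0 cols 1).map (fun x => if PySem.Int.mod x 8 = 0 then (1 : Int) else 0)) := by
  by_cases hy : PySem.Int.mod y 6 = 0
  · rw [if_pos hy, PySem.List.pyRepeat_singleton, List.eq_replicate_iff]
    refine ⟨by simp [PySem.List.length_pyRange_one], ?_⟩
    intro b hb
    simp only [List.mem_map] at hb
    obtain ⟨x, _, rfl⟩ := hb
    unfold pvCell
    rw [if_pos (Or.inl hy)]
  · rw [if_neg hy]
    apply List.map_congr_left
    intro x _
    unfold pvCell
    by_cases hx : PySem.Int.mod x 8 = 0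
    · rw [if_pos (Or.inr hx), if_pos hx]
    · rw [if_neg (by tauto), if_neg hx]

theorem make_grid_lattice_spec : Claim_equal_make_grid_lattice := by
  intro cols rows _
  unfold Spec_make_grid_lattice
  by_cases hr : rows ≤ 0
  · simp [make_grid_lattice, make_grid_lattice_alt, PySem.List.pyRange_one_eq_nil hr, hr]
  rw [make_grid_lattice_alt.eq_def, if_neg hr]
  show (PySem.List.pyRange 0 rows 1).foldl (fun g y => pvInner cols y g)
      ((PySem.List.pyRange 0 rows 1).map (fun _ => PySem.List.pyRepeat [0] cols)) =
    (PySem.List.pyRange 0 rows 1).map (fun y =>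
      if PySem.Int.mod y 6 = 0 then PySem.List.pyRepeat [1] cols
      else (PySem.List.pyRange 0 cols 1).map (fun x => if PySem.Int.mod x 8 = 0 then (1 : Int) else 0))
  have hgrid : (PySem.List.pyRange 0 rows 1).map (fun _ => PySem.List.pyRepeat [0] cols) =
      List.replicate rows.toNat (List.replicate cols.toNat (0 : Int)) := by
    rw [List.eq_replicate_iff]
    refine ⟨by simp [PySem.List.length_pyRange_one], ?_⟩
    intro b hb
    simp only [List.mem_map] at hb
    obtain ⟨x, _, rfl⟩ := hb
    simp [PySem.List.pyRepeat_singleton]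
  rw [hgrid]
  rw [pv_range_toNat rows]
  have h0 : ((0 : Nat) : Int) = (0 : Int) := rfl
  have hout := pvOuter_fold cols rows.toNat rows.toNat 0 [] rfl (by omega) (by omega)
  rw [h0, List.nil_append] at hout
  rw [hout]
  apply List.map_congr_left
  intro y _
  exact pvRow_eq_proto cols y
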